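-- pv_equiv track=rewrite | github.com/SteffenAP/INF100 | lab9/uke_09_oppg_10.py | addToInventory
-- ===== SOURCE A (Python) =====
-- def addToInventory(inventory, addedItems):
--     for item in range(len(addedItems)):
--         if addedItems[item] in inventory:
--             for key in inventory:
--                 if addedItems[item] == key:
--                     inventory[key] += 1
--         else:
--             inventory.update({addedItems[item] : 1})
--     return inventory
-- ===== SOURCE B (Python) =====
-- def addToInventory(inventory, addedItems):
--     # First pass: aggregate the added items into a frequency table.
--     counts = {}
--     for i in range(len(addedItems)):
--         counts[addedItems[i]] = counts.get(addedItems[i], 0) + 1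
--     # Second pass: merge the table into the inventory (mutates it, like A).
--     for key, n in counts.items():
--         inventory[key] = inventory.get(key, 0) + n
--     return inventory
-- ===== Notes on version B (the rewrite author's own statement) =====
-- stated objective: faster
-- what changed: B replaces A's per-item increment with an inner scan over all inventory keys by a two-pass aggregation: it first builds a frequency dict of the added items, then merges that table into the inventory in one pass.
import Mathlib
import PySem

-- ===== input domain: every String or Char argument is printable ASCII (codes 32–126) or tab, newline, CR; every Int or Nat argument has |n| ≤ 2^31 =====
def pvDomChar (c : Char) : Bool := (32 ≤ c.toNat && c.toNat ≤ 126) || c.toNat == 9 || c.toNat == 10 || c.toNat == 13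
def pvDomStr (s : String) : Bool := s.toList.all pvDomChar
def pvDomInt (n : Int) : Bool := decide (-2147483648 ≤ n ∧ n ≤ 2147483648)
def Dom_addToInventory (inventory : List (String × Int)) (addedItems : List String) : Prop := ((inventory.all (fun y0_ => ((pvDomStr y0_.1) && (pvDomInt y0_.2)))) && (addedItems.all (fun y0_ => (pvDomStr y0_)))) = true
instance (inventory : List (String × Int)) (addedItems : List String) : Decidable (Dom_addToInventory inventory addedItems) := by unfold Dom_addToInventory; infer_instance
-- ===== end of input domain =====

-- ===== PORT A =====
-- B changes the decomposition: a frequency table of the added items is built first, then merged into the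
-- inventory in one pass (A increments per item with an inner scan over all inventory keys); same return value.
-- Python A mutates the `inventory` dict in place and returns it; the equivalence proved here is about the
-- returned value (B performs the same mutation).
-- A: for item in range(len(addedItems)): if addedItems[item] in inventory: for key in inventory: if ==: +=1
--    else: inventory.update({addedItems[item]: 1}).  The inner `for key in inventory` iterates the live dict,
--    but the loop body only changes values (never the key set), so folding over a snapshot of the keys is exact.
def addToInventory (inventory : List (String × Int)) (addedItems : List String) : List (String × Int) :=
  (((PySem.List.pyRange 0 (PySem.List.len addedItems) 1).foldl (fun d item =>
      let x := PySem.List.pyGetD addedItems item "";   -- addedItems[item]; item ∈ range(len) so always in range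
      if d.contains x then
        -- for key in inventory: if addedItems[item] == key: inventory[key] += 1   (key present, so no KeyError)
        d.keys.foldl (fun d' key => if x == key then d'.modify key 0 (fun v => v + 1) else d') d
      else
        d.update [(x, 1)])   -- inventory.update({addedItems[item]: 1})
    (PySem.Dict.mk inventory))).items

-- ===== PORT B =====
def addToInventory_alt (inventory : List (String × Int)) (addedItems : List String) : List (String × Int) :=
  -- counts = {}; for i in range(len(addedItems)): counts[addedItems[i]] = counts.get(addedItems[i], 0) + 1
  let counts := (PySem.List.pyRange 0 (PySem.List.len addedItems) 1).foldl (fun c i =>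
      let x := PySem.List.pyGetD addedItems i "";   -- addedItems[i]; i ∈ range(len) so always in range
      c.insert x (c.getD x 0 + 1)) PySem.Dict.empty;
  -- for key, n in counts.items(): inventory[key] = inventory.get(key, 0) + n
  ((counts.items.foldl (fun d p => d.insert p.1 (d.getD p.1 0 + p.2)) (PySem.Dict.mk inventory))).items

-- ===== PRECONDITION & SPEC =====
-- Pre_ excludes association lists whose keys repeat: a Python dict cannot have duplicate keys, so such a
-- list does not represent any input the Python programs can receive.
def Pre_addToInventory (inventory : List (String × Int)) (addedItems : List String) : Prop :=
  (inventory.map Prod.fst).Nodup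
instance (inventory : List (String × Int)) (addedItems : List String) : Decidable (Pre_addToInventory inventory addedItems) := by unfold Pre_addToInventory; infer_instance
def pvWitness_addToInventory : (List (String × Int)) × List String := ([("apple", 2), ("pear", 1)], ["apple", "plum", "apple"])

def Spec_addToInventory (inventory : List (String × Int)) (addedItems : List String) (out : List (String × Int)) : Prop := out = addToInventory_alt inventory addedItems
instance (inventory : List (String × Int)) (addedItems : List String) (out : List (String × Int)) : Decidable (Spec_addToInventory inventory addedItems out) := by unfold Spec_addToInventory; infer_instance

-- ===== CLAIM (what is proved, stated in full; the proofs are below) =====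
def Claim_equal_addToInventory : Prop := ∀ (inventory : List (String × Int)) (addedItems : List String), Dom_addToInventory inventory addedItems → Pre_addToInventory inventory addedItems → Spec_addToInventory inventory addedItems (addToInventory inventory addedItems)

-- ===== LEMMAS AND PROOFS =====

-- A's inner scan over the keys hits no key when x is absent from ks …
lemma foldl_scan_of_not_mem (x : String) (ks : List String)
    (d : PySem.Dict String Int) (hx : x ∉ ks) :
    ks.foldl (fun d' key => if x == key then d'.modify key 0 (fun v => v + 1) else d') d = d := by
  induction ks generalizing d with
  | nil => rfl
  | cons k ks ih =>
    simp only [List.mem_cons, not_or] at hx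
    rw [List.foldl_cons, if_neg (by simp [hx.1])]
    exact ih d hx.2

-- … and exactly one key when the keys are distinct and x is among them: the scan is a single modify.
lemma foldl_scan_of_mem (x : String) (ks : List String)
    (d : PySem.Dict String Int) (hnd : ks.Nodup) (hx : x ∈ ks) :
    ks.foldl (fun d' key => if x == key then d'.modify key 0 (fun v => v + 1) else d') d
      = d.modify x 0 (fun v => v + 1) := by
  induction ks generalizing d with
  | nil => cases hx
  | cons k ks ih =>
    rcases List.nodup_cons.mp hnd with ⟨hk, hnd'⟩
    by_cases hxk : x = k
    · subst hxk
      rw [List.foldl_cons, if_pos (by simp)]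
      exact foldl_scan_of_not_mem x ks _ hk
    · rw [List.foldl_cons, if_neg (by simp [hxk])]
      exact ih d hnd' ((List.mem_cons.mp hx).resolve_left hxk)

-- One step of A (on a dict with distinct keys) is exactly the Counter step `d.modify x 0 (·+1)`.
lemma stepA_eq_modify (d : PySem.Dict String Int) (x : String) (hnd : d.keys.Nodup) :
    (if d.contains x then
        d.keys.foldl (fun d' key => if x == key then d'.modify key 0 (fun v => v + 1) else d') d
      else d.update [(x, 1)])
      = d.modify x 0 (fun v => v + 1) := by
  by_cases hc : d.contains x = true
  · rw [if_pos hc]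
    exact foldl_scan_of_mem x d.keys d hnd ((PySem.Dict.contains_iff_mem_keys d x).mp hc)
  · rw [if_neg hc]
    have hg : d.getD x 0 = 0 :=
      PySem.Dict.getD_of_not_contains d (0 : Int) (by simpa using hc)
    simp [PySem.Dict.update, PySem.Dict.modify, hg]

-- A's whole loop, from any dict with distinct keys, is the Counter-building fold.
lemma foldA_eq_foldl_modify (xs : List String) (d : PySem.Dict String Int) (hnd : d.keys.Nodup) :
    xs.foldl (fun d x =>
        if d.contains x then
          d.keys.foldl (fun d' key => if x == key then d'.modify key 0 (fun v => v + 1) else d') d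
        else d.update [(x, 1)]) d
      = xs.foldl (fun d x => d.modify x 0 (fun v => v + 1)) d := by
  induction xs generalizing d with
  | nil => rfl
  | cons y ys ih =>
    simp only [List.foldl_cons, stepA_eq_modify d y hnd]
    exact ih _ (by
      simpa [PySem.Dict.modify] using
        PySem.Dict.nodup_keys_insert d y (d.getD y 0 + 1) hnd)

-- set.update distributes over a pre-deduplicated update list.
lemma set_update_update (xs : List String) (u e : PySem.Set String) :
    PySem.Set.update u (PySem.Set.update e xs) = PySem.Set.update (PySem.Set.update u e) xs := by
  induction xs generalizing e with
  | nil => simp [PySem.Set.update_nil]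
  | cons x xs ih =>
    rw [PySem.Set.update_cons, PySem.Set.update_cons, ih]
    congr 1
    by_cases hx : x ∈ e
    · rw [PySem.Set.add_of_mem hx, PySem.Set.add_of_mem ((PySem.Set.mem_update u e x).mpr (Or.inr hx))]
    · rw [PySem.Set.add_of_not_mem hx, PySem.Set.update_append, PySem.Set.update_cons,
        PySem.Set.update_nil]

lemma set_update_ofList (xs : List String) (u : PySem.Set String) :
    PySem.Set.update u (PySem.Set.ofList xs) = PySem.Set.update u xs := by
  have := set_update_update xs u PySem.Set.empty
  simpa [PySem.Set.update_nil_left, PySem.Set.update_nil, PySem.Set.empty] using this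

-- B's merge pass: each step adds p.2 at key p.1, so the final value at k adds the matching weights.
lemma merge_getD (l : List (String × Int)) (d : PySem.Dict String Int) (k : String) :
    (l.foldl (fun d p => d.insert p.1 (d.getD p.1 0 + p.2)) d).getD k 0
      = d.getD k 0 + ((l.filter (fun p => p.1 == k)).map (·.2)).sum := by
  induction l generalizing d with
  | nil => simp
  | cons p l ih =>
    simp only [List.foldl_cons, ih, List.filter_cons]
    by_cases hk : p.1 = k
    · subst hk
      simp
      ring
    · have hbk : (p.1 == k) = false := by simp [hk]
      simp [PySem.Dict.getD_insert, hbk, Ne.symm hk]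

-- A Nodup list filtered for equality with k is [k] or [].
lemma filter_beq_of_nodup (s : List String) (k : String) (hnd : s.Nodup) :
    s.filter (fun y => y == k) = if k ∈ s then [k] else [] := by
  induction s with
  | nil => simp
  | cons a s ih =>
    rcases List.nodup_cons.mp hnd with ⟨ha, hnd'⟩
    by_cases hak : a = k
    · subst hak
      simp [ih hnd', ha]
    · simp [beq_iff_eq, hak, ih hnd', Ne.symm hak]

-- Specialisation of merge_getD to the counter's items: the merged value at k gains count xs k.
lemma merge_counter_getD (xs : List String) (d : PySem.Dict String Int) (k : String) :
    ((PySem.Dict.counter xs).items.foldl (fun d p => d.insert p.1 (d.getD p.1 0 + p.2)) d).getD k 0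
      = d.getD k 0 + xs.count k := by
  rw [merge_getD, PySem.Dict.items_counter]
  have hfm : ((PySem.Set.ofList xs).map (fun k' => (k', (xs.count k' : Int)))).filter
        (fun p => p.1 == k)
      = ((PySem.Set.ofList xs).filter (fun y => y == k)).map (fun k' => (k', (xs.count k' : Int))) := by
    rw [List.filter_map]
    rfl
  rw [hfm, filter_beq_of_nodup _ k (PySem.Set.nodup_ofList xs)]
  by_cases hk : k ∈ xs
  · simp [PySem.Set.mem_ofList, hk]
  · simp [PySem.Set.mem_ofList, hk, List.count_eq_zero_of_not_mem hk]

-- Keys of B's merge pass over the counter's items: the inventory keys updated with the distinct added items.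
lemma merge_counter_keys (xs : List String) (d : PySem.Dict String Int) :
    ((PySem.Dict.counter xs).items.foldl (fun d p => d.insert p.1 (d.getD p.1 0 + p.2)) d).keys
      = PySem.Set.update d.keys xs := by
  refine (PySem.Dict.keys_foldl_insert_key (PySem.Dict.counter xs).items Prod.fst
      (fun d p => d.getD p.1 0 + p.2) d).trans ?_
  have hmap : (PySem.Dict.counter xs).items.map Prod.fst = PySem.Set.ofList xs := by
    have h := PySem.Dict.keys_counter xs
    simpa [PySem.Dict.keys] using h
  rw [hmap, set_update_ofList]

-- The two dicts produced from the same start agree (keys, values, hence items).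
lemma core_dict_eq (xs : List String) (d : PySem.Dict String Int) (hnd : d.keys.Nodup) :
    xs.foldl (fun d x => d.modify x 0 (fun v => v + 1)) d
      = (PySem.Dict.counter xs).items.foldl (fun d p => d.insert p.1 (d.getD p.1 0 + p.2)) d := by
  apply PySem.Dict.ext
  have hndL : (xs.foldl (fun d x => d.modify x 0 (fun v => v + 1)) d).keys.Nodup := by
    exact PySem.Dict.nodup_keys_foldl_modify_key xs (fun x => x) 0 (fun _ _ => (· + 1)) d hnd
  have hndR : ((PySem.Dict.counter xs).items.foldl
      (fun d p => d.insert p.1 (d.getD p.1 0 + p.2)) d).keys.Nodup :=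
    PySem.Dict.nodup_keys_foldl_insert_key _ Prod.fst _ d hnd
  rw [PySem.Dict.items_eq_map_keys _ hndL (0 : Int), PySem.Dict.items_eq_map_keys _ hndR (0 : Int)]
  rw [PySem.Dict.keys_foldl_modify, merge_counter_keys]
  apply List.map_congr_left
  intro k _
  rw [PySem.Dict.getD_foldl_modify_add_one, merge_counter_getD]

-- ===== VERDICT (by name: the statement is the Claim_ definition above) =====
theorem addToInventory_spec : Claim_equal_addToInventory := by
  intro inventory addedItems _ hpre
  unfold Spec_addToInventory addToInventory addToInventory_alt
  have hnd : (PySem.Dict.mk inventory).keys.Nodup := by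
    simpa [PySem.Dict.keys] using hpre
  have hmain : (addedItems.foldl (fun d x =>
        if d.contains x then
          d.keys.foldl (fun d' key => if x == key then d'.modify key 0 (fun v => v + 1) else d') d
        else d.update [(x, 1)]) (PySem.Dict.mk inventory)).items
      = ((PySem.Dict.counter addedItems).items.foldl
          (fun d p => d.insert p.1 (d.getD p.1 0 + p.2)) (PySem.Dict.mk inventory)).items := by
    rw [foldA_eq_foldl_modify addedItems _ hnd]
    exact congrArg PySem.Dict.items (core_dict_eq addedItems _ hnd)
  exact (congrArg PySem.Dict.items (PySem.List.foldl_pyRange_zero_pyGetD addedItems ""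
      (fun d x =>
        if d.contains x then
          d.keys.foldl (fun d' key => if x == key then d'.modify key 0 (fun v => v + 1) else d') d
        else d.update [(x, 1)]) (PySem.Dict.mk inventory))).trans
    (hmain.trans (congrArg (fun c : PySem.Dict String Int =>
        (c.items.foldl (fun d p => d.insert p.1 (d.getD p.1 0 + p.2)) (PySem.Dict.mk inventory)).items)
      ((PySem.List.foldl_pyRange_zero_pyGetD addedItems ""
          (fun c x => c.insert x (c.getD x 0 + 1)) PySem.Dict.empty).trans
        (PySem.Dict.foldl_insert_getD_add_one_eq_counter addedItems))).symm)
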